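-- pv_equiv track=rewrite | github.com/luqi08/Programacion-1 | py/funciones.py | crearMatrizAsientos
-- ===== SOURCE A (Python) =====
-- def crearMatrizAsientos(total_asientos: int, asientos_por_fila: int) -> list[list]:
--     """
--     Crea una matriz rectangular para representar la disposición de asientos en un avión
--     y luego intercambia filas por columnas.
--
--     Args:
--     - total_asientos (int): Número total de asientos a organizar.
--     - asientos_por_fila (int): Número de asientos por fila.
--
--     Returns:
--     - list: Matriz  (filas convertidas a columnas).
--     """
--     # Crear la matriz original
--     filas_completas = total_asientos // asientos_por_fila
--     asientos_restantes = total_asientos % asientos_por_fila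
--
--     matriz = [[0] * asientos_por_fila for _ in range(filas_completas)]
--     if asientos_restantes > 0:
--         fila_extra = [0] * asientos_restantes + [0] * (asientos_por_fila - asientos_restantes)
--         matriz.append(fila_extra)
--
--     # Transponer la matriz (intercambiar filas por columnas)
--     matriz = [list(fila) for fila in zip(*matriz)]
--
--     return matriz
-- ===== SOURCE B (Python) =====
-- def crearMatrizAsientos(total_asientos: int, asientos_por_fila: int) -> list[list]:
--     # Build the transposed all-zeros grid directly: one row per seat position,
--     # each of width n_rows, instead of building the matrix and zip-transposing it.
--     filas_completas = total_asientos // asientos_por_fila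
--     asientos_restantes = total_asientos % asientos_por_fila
--     n_rows = max(filas_completas, 0) + (1 if asientos_restantes > 0 else 0)
--     if n_rows == 0:
--         return []
--     return [[0] * n_rows for _ in range(asientos_por_fila)]
-- ===== Notes on version B (the rewrite author's own statement) =====
-- stated objective: simpler
-- what changed: B computes the row count arithmetically and constructs the transposed all-zeros grid directly, instead of building the untransposed matrix and transposing it with zip(*...).
import Mathlib
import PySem

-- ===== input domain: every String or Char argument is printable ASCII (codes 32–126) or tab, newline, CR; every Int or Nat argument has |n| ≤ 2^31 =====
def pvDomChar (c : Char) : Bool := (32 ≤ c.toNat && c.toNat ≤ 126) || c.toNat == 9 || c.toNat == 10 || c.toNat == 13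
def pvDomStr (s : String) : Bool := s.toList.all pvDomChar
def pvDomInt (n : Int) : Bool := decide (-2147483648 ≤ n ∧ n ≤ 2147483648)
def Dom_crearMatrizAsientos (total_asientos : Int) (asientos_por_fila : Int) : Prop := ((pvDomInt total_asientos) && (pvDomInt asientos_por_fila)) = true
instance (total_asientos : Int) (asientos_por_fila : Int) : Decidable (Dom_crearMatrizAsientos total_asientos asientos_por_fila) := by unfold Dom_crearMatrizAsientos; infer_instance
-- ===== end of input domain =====

-- B builds the transposed zero grid directly from the computed row count instead of
-- building the matrix and transposing it with zip(*...); objective: simpler.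

-- ===== PORT A =====
-- zip(*matriz) followed by list(): take heads of all rows while every row is nonempty.
def pyZipStar : List (List Int) → List (List Int)
  | [] => []
  | r :: rs =>
    if _h : (r :: rs).all (fun x => !x.isEmpty) then
      ((r :: rs).map List.headI) :: pyZipStar ((r :: rs).map List.tail)
    else []
termination_by m => m.headI.length
decreasing_by
  simp only [List.all_cons, Bool.and_eq_true, Bool.not_eq_true', List.isEmpty_eq_false_iff] at _h
  simp only [List.map_cons, List.headI]
  cases r with
  | nil => exact absurd rfl _h.1
  | cons x xs => simp

def crearMatrizAsientos (total_asientos : Int) (asientos_por_fila : Int) : List (List Int) :=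
  let filas_completas := PySem.Int.floordiv total_asientos asientos_por_fila
  let asientos_restantes := PySem.Int.mod total_asientos asientos_por_fila
  let matriz := List.replicate filas_completas.toNat (List.replicate asientos_por_fila.toNat (0 : Int))
  let matriz :=
    if asientos_restantes > 0 then
      matriz ++ [List.replicate asientos_restantes.toNat (0 : Int) ++
                 List.replicate (asientos_por_fila - asientos_restantes).toNat (0 : Int)]
    else matriz
  pyZipStar matriz

-- ===== PORT B =====
def crearMatrizAsientos_alt (total_asientos : Int) (asientos_por_fila : Int) : List (List Int) :=
  let filas_completas := PySem.Int.floordiv total_asientos asientos_por_fila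
  let asientos_restantes := PySem.Int.mod total_asientos asientos_por_fila
  let nRows := max filas_completas 0 + (if asientos_restantes > 0 then 1 else 0)
  if nRows = 0 then []
  else List.replicate asientos_por_fila.toNat (List.replicate nRows.toNat (0 : Int))

-- ===== PRECONDITION & SPEC =====
-- A raises ZeroDivisionError when asientos_por_fila = 0; those inputs are excluded.
def Pre_crearMatrizAsientos (_total_asientos : Int) (asientos_por_fila : Int) : Prop := asientos_por_fila ≠ 0
instance (total_asientos : Int) (asientos_por_fila : Int) : Decidable (Pre_crearMatrizAsientos total_asientos asientos_por_fila) := by unfold Pre_crearMatrizAsientos; infer_instance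
def pvWitness_crearMatrizAsientos : Int × Int := (7, 2)

def Spec_crearMatrizAsientos (total_asientos : Int) (asientos_por_fila : Int) (out : List (List Int)) : Prop := out = crearMatrizAsientos_alt total_asientos asientos_por_fila
instance (total_asientos : Int) (asientos_por_fila : Int) (out : List (List Int)) : Decidable (Spec_crearMatrizAsientos total_asientos asientos_por_fila out) := by unfold Spec_crearMatrizAsientos; infer_instance

-- ===== CLAIM (what is proved, stated in full; the proofs are below) =====
def Claim_equal_crearMatrizAsientos : Prop := ∀ (total_asientos : Int) (asientos_por_fila : Int), Dom_crearMatrizAsientos total_asientos asientos_por_fila → Pre_crearMatrizAsientos total_asientos asientos_por_fila → Spec_crearMatrizAsientos total_asientos asientos_por_fila (crearMatrizAsientos total_asientos asientos_por_fila)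

-- ===== LEMMAS AND PROOFS =====

-- zip-transpose of an n × k all-zeros matrix.
theorem pyZipStar_replicate (k n : Nat) :
    pyZipStar (List.replicate n (List.replicate k (0 : Int))) =
      if n = 0 then [] else List.replicate k (List.replicate n (0 : Int)) := by
  induction k generalizing n with
  | zero =>
    cases n with
    | zero => simp [pyZipStar]
    | succ m => simp [List.replicate_succ, pyZipStar]
  | succ k ih =>
    cases n with
    | zero => simp [pyZipStar]
    | succ m =>
      rw [List.replicate_succ, pyZipStar]
      have hall : ((List.replicate (k + 1) (0 : Int)) :: List.replicate m (List.replicate (k + 1) 0)).all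
          (fun x => !x.isEmpty) = true := by
        simp [List.replicate_succ]
      rw [dif_pos hall]
      have h1 : ((List.replicate (k + 1) (0 : Int)) :: List.replicate m (List.replicate (k + 1) 0)).map List.headI
          = List.replicate (m + 1) (0 : Int) := by
        simp [List.replicate_succ, List.map_replicate, List.headI]
      have h2 : ((List.replicate (k + 1) (0 : Int)) :: List.replicate m (List.replicate (k + 1) 0)).map List.tail
          = List.replicate (m + 1) (List.replicate k (0 : Int)) := by
        simp [List.replicate_succ (n := m), List.map_replicate, List.tail_replicate]
      rw [h1, h2, ih (m + 1)]
      simp [List.replicate_succ]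

theorem crearMatrizAsientos_eq_alt (total_asientos asientos_por_fila : Int)
    (hpre : asientos_por_fila ≠ 0) :
    crearMatrizAsientos total_asientos asientos_por_fila =
      crearMatrizAsientos_alt total_asientos asientos_por_fila := by
  unfold crearMatrizAsientos crearMatrizAsientos_alt
  set fc := PySem.Int.floordiv total_asientos asientos_por_fila with hfc
  set rest := PySem.Int.mod total_asientos asientos_por_fila with hrest
  by_cases hr : rest > 0
  · -- extra partial row: rest > 0 forces asientos_por_fila > 0 (mod takes the divisor's sign)
    have hapf : 0 < asientos_por_fila := by
      by_contra h
      push Not at h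
      have hlt : asientos_por_fila < 0 := lt_of_le_of_ne h hpre
      have := (PySem.Int.mod_neg_bounds (a := total_asientos) hlt).2
      rw [← hrest] at this
      omega
    have hltb : rest < asientos_por_fila := by
      have := PySem.Int.mod_lt (a := total_asientos) hapf
      rw [← hrest] at this; exact this
    simp only [if_pos hr]
    have hext : List.replicate rest.toNat (0 : Int) ++
        List.replicate (asientos_por_fila - rest).toNat (0 : Int) =
        List.replicate asientos_por_fila.toNat (0 : Int) := by
      rw [← List.replicate_add]
      congr 1
      omega
    have hrow : List.replicate fc.toNat (List.replicate asientos_por_fila.toNat (0 : Int)) ++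
        [List.replicate asientos_por_fila.toNat (0 : Int)] =
        List.replicate (fc.toNat + 1) (List.replicate asientos_por_fila.toNat (0 : Int)) := by
      rw [List.replicate_add]
      simp
    rw [hext, hrow, pyZipStar_replicate]
    have hne : max fc 0 + 1 ≠ 0 := by
      have : 0 ≤ max fc 0 := le_max_right _ _
      omega
    rw [if_neg (by omega : ¬ fc.toNat + 1 = 0), if_neg hne]
    have : (max fc 0 + 1).toNat = fc.toNat + 1 := by omega
    rw [this]
  · simp only [if_neg hr]
    rw [pyZipStar_replicate]
    have hmax : (max fc 0 + 0).toNat = fc.toNat := by omega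
    by_cases hz : fc.toNat = 0
    · rw [if_pos hz, if_pos (by omega : max fc 0 + 0 = 0)]
    · rw [if_neg hz, if_neg (by omega : ¬ max fc 0 + 0 = 0), hmax]

-- ===== VERDICT (by name: the statement is the Claim_ definition above) =====
theorem crearMatrizAsientos_spec : Claim_equal_crearMatrizAsientos := by
  intro ta apf _ hpre
  unfold Spec_crearMatrizAsientos
  exact crearMatrizAsientos_eq_alt ta apf hpre
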